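-- pv_equiv track=rewrite | github.com/JuanDavidTriana/ProyectoPio | 8. Funciones 2/Ejercicio2.py | procesar_numeros
-- ===== SOURCE A (Python) =====
-- def procesar_numeros(numeros:list):
--     def es_positivo(n):
--         return n > 0
--
--     def es_negativo(n):
--         return n < 0
--
--     def es_par(n):
--         return n % 2 == 0
--
--     def filtro_pro(lista):
--         totalPositivos = 0
--         totalNegativos = 0
--         totalPares = 0
--
--         for numero in lista:
--             if es_positivo(numero):
--                 totalPositivos += numero
--             if es_negativo(numero):
--                 totalNegativos += numero
--             if es_par(numero):
--                 totalPares += numero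
--
--         '''
--         Ejemeplos Diccionario
--         return {
--             "Positivos": totalPositivos,
--             "Negativos": totalNegativos
--             }
--         '''
--         return [totalPositivos,totalNegativos,totalPares]
--
--     return filtro_pro(numeros)
-- ===== SOURCE B (Python) =====
-- def procesar_numeros(numeros: list):
--     pos = sum(n for n in numeros if n > 0)
--     neg = sum(n for n in numeros if n < 0)
--     par = sum(n for n in numeros if n % 2 == 0)
--     return [pos, neg, par]
-- ===== Notes on version B (the rewrite author's own statement) =====
-- stated objective: idiomatic
-- what changed: Replaced the nested helper predicates and the single three-accumulator loop with three independent sum-over-generator passes, one per returned total.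
import Mathlib
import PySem

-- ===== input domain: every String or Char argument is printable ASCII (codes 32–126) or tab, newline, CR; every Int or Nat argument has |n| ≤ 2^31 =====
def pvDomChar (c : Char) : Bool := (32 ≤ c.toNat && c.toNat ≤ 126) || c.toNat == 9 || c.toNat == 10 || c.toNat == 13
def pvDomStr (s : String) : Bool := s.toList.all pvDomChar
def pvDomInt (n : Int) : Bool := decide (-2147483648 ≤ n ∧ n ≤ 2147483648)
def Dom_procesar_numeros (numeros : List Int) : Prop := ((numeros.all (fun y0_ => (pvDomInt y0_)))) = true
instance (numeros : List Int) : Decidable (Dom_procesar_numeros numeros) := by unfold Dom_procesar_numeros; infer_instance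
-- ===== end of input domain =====

-- B drops the nested helpers and single three-accumulator loop in favour of three
-- independent filtered-sum passes (idiomatic decomposition); same results, no speed claim.

-- ===== PORT A =====
-- nested helper predicates, transliterated
def pvEsPositivo (n : Int) : Bool := n > 0
def pvEsNegativo (n : Int) : Bool := n < 0
def pvEsPar (n : Int) : Bool := PySem.Int.mod n 2 == 0

-- one iteration of filtro_pro's loop body (the three ifs, in order)
def pvFiltroStep (acc : Int × Int × Int) (numero : Int) : Int × Int × Int :=
  let acc := if pvEsPositivo numero then (acc.1 + numero, acc.2.1, acc.2.2) else acc
  let acc := if pvEsNegativo numero then (acc.1, acc.2.1 + numero, acc.2.2) else acc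
  if pvEsPar numero then (acc.1, acc.2.1, acc.2.2 + numero) else acc

-- filtro_pro: single loop carrying the three accumulators
def pvFiltroPro (lista : List Int) : List Int :=
  let st := lista.foldl pvFiltroStep (0, 0, 0)
  [st.1, st.2.1, st.2.2]

def procesar_numeros (numeros : List Int) : List Int := pvFiltroPro numeros

-- ===== PORT B =====
-- three independent filtered-sum passes
def procesar_numeros_alt (numeros : List Int) : List Int :=
  [((numeros.filter (fun n => n > 0)).sum),
   ((numeros.filter (fun n => n < 0)).sum),
   ((numeros.filter (fun n => PySem.Int.mod n 2 == 0)).sum)]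

-- ===== PRECONDITION & SPEC =====
def Spec_procesar_numeros (numeros : List Int) (out : List Int) : Prop := out = procesar_numeros_alt numeros
instance (numeros : List Int) (out : List Int) : Decidable (Spec_procesar_numeros numeros out) := by unfold Spec_procesar_numeros; infer_instance

-- ===== CLAIM (what is proved, stated in full; the proofs are below) =====
def Claim_equal_procesar_numeros : Prop := ∀ (numeros : List Int), Dom_procesar_numeros numeros → Spec_procesar_numeros numeros (procesar_numeros numeros)

-- ===== LEMMAS AND PROOFS =====
theorem pvFiltroPro_inv (lista : List Int) (p q r : Int) :
    lista.foldl pvFiltroStep (p, q, r)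
    = (p + ((lista.filter (fun n => n > 0)).sum),
       q + ((lista.filter (fun n => n < 0)).sum),
       r + ((lista.filter (fun n => PySem.Int.mod n 2 == 0)).sum)) := by
  induction lista generalizing p q r with
  | nil => simp
  | cons x xs ih =>
    simp only [List.foldl_cons, List.filter_cons]
    rw [pvFiltroStep, pvEsPositivo, pvEsNegativo, pvEsPar]
    split_ifs <;> (rw [ih]; try simp; try ring; try simp)

-- ===== VERDICT (by name: the statement is the Claim_ definition above) =====
theorem procesar_numeros_spec : Claim_equal_procesar_numeros := by
  intro numeros _
  unfold Spec_procesar_numeros procesar_numeros procesar_numeros_alt pvFiltroPro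
  simp [pvFiltroPro_inv]
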